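-- pv_equiv track=rewrite | github.com/pobiedimska/python-laboratory | laboratory4/task2.py | StrSpn
-- ===== SOURCE A (Python) =====
-- def StrSpn(main_string: str, string_chars: str):
--     main_string = main_string.split(' ')
--     string_chars.replace(" ", "")
--     for string in main_string:
--         good_string = True
--         for char in string:
--             if not string_chars.__contains__(char):
--                 # символ зі слова не знаходиться у рядку із символами
--                 good_string = False
--         if good_string:
--             return "Довжина першого слова, усі символи якого містяться у рядочку з символами: " + str(len(string))
--     return 'У рядочку s немає таких слів, які б містили тільки символи з рядка s1 '
-- ===== SOURCE B (Python) =====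
-- def StrSpn(main_string: str, string_chars: str):
--     # single character scan instead of split: running word length + validity flag
--     count = 0
--     valid = True
--     for ch in main_string:
--         if ch == ' ':
--             if valid:
--                 return "Довжина першого слова, усі символи якого містяться у рядочку з символами: " + str(count)
--             count = 0
--             valid = True
--         else:
--             valid = valid and (ch in string_chars)
--             count += 1
--     if valid:
--         return "Довжина першого слова, усі символи якого містяться у рядочку з символами: " + str(count)
--     return 'У рядочку s немає таких слів, які б містили тільки символи з рядка s1 '
-- ===== Notes on version B (the rewrite author's own statement) =====
-- stated objective: alternative
-- what changed: B replaces split(' ') plus a nested per-word loop with a single character scan keeping a running word-length counter and a validity flag, allocating no word list.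
import Mathlib
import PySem

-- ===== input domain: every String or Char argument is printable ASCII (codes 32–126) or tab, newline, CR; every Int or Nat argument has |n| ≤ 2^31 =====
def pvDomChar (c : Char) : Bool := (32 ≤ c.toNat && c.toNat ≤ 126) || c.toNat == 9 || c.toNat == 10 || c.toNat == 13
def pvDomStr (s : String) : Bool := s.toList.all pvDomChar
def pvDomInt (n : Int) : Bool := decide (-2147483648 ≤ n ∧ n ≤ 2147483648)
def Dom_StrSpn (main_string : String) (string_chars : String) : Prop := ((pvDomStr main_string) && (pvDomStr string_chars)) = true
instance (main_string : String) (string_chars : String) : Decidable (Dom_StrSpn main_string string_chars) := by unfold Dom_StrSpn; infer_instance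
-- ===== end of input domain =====

-- B replaces split(' ') + nested per-word loop by a single character scan with a
-- running word-length counter and a validity flag (no word list is built).

-- the two message literals (shared by both ports, as in both Pythons)
def pvMsgLen : String := "Довжина першого слова, усі символи якого містяться у рядочку з символами: "
def pvMsgNone : String := "У рядочку s немає таких слів, які б містили тільки символи з рядка s1 "

-- ===== PORT A =====
-- the 'for string in main_string: …' loop of A
def StrSpnGoA : List (List Char) → List Char → String
  | [], _ => pvMsgNone
  | w :: ws, sc =>
    -- good_string = True; for char in string: if not contains: good_string = False
    let good := w.foldl (fun g c => if !(PySem.Chars.isIn [c] sc) then false else g) true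
    if good then pvMsgLen ++ PySem.Int.toStr (PySem.Chars.len w) else StrSpnGoA ws sc

def StrSpn (main_string : String) (string_chars : String) : String :=
  let words := PySem.Chars.splitOn main_string.toList [' ']           -- main_string.split(' ')
  let _ := PySem.Str.replace string_chars " " ""                       -- result discarded, as in A
  StrSpnGoA words string_chars.toList

-- ===== PORT B =====
-- single scan: n = current word length, v = current word still valid
def StrSpnGoB : List Char → List Char → Nat → Bool → String
  | [], _, n, v => if v then pvMsgLen ++ PySem.Int.toStr (n : Int) else pvMsgNone
  | c :: rest, sc, n, v =>
    if c = ' ' then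
      if v then pvMsgLen ++ PySem.Int.toStr (n : Int) else StrSpnGoB rest sc 0 true
    else
      StrSpnGoB rest sc (n + 1) (v && PySem.Chars.isIn [c] sc)

def StrSpn_alt (main_string : String) (string_chars : String) : String :=
  StrSpnGoB main_string.toList string_chars.toList 0 true

-- ===== PRECONDITION & SPEC =====
def Spec_StrSpn (main_string : String) (string_chars : String) (out : String) : Prop := out = StrSpn_alt main_string string_chars
instance (main_string : String) (string_chars : String) (out : String) : Decidable (Spec_StrSpn main_string string_chars out) := by unfold Spec_StrSpn; infer_instance

-- ===== CLAIM (what is proved, stated in full; the proofs are below) =====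
def Claim_equal_StrSpn : Prop := ∀ (main_string : String) (string_chars : String), Dom_StrSpn main_string string_chars → Spec_StrSpn main_string string_chars (StrSpn main_string string_chars)

-- ===== LEMMAS AND PROOFS =====

-- prepend a prefix onto the first piece
def pvAttach (x : List Char) : List (List Char) → List (List Char)
  | [] => [x]
  | w :: ws => (x ++ w) :: ws

-- forward recursion computing split(' ') on a char list
def pvSplitSp : List Char → List (List Char)
  | [] => [[]]
  | c :: rest => if c = ' ' then [] :: pvSplitSp rest else pvAttach [c] (pvSplitSp rest)

theorem pvSplitSp_ne_nil (l : List Char) : pvSplitSp l ≠ [] := by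
  cases l with
  | nil => simp [pvSplitSp]
  | cons c rest =>
    simp only [pvSplitSp]
    split
    · simp
    · cases h : pvSplitSp rest <;> simp [pvAttach]

theorem pvAttach_nil {S : List (List Char)} (h : S ≠ []) : pvAttach [] S = S := by
  cases S with
  | nil => exact absurd rfl h
  | cons w ws => simp [pvAttach]

theorem pvAttach_attach (a b : List Char) (S : List (List Char)) :
    pvAttach a (pvAttach b S) = pvAttach (a ++ b) S := by
  cases S <;> simp [pvAttach]

theorem pvGo_eq (fuel : Nat) (l cur : List Char) (acc : List (List Char))
    (h : l.length ≤ fuel) :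
    PySem.Chars.splitOn.go [' '] fuel l cur acc
      = acc.reverse ++ pvAttach cur.reverse (pvSplitSp l) := by
  induction fuel generalizing l cur acc with
  | zero =>
    have hl : l = [] := List.eq_nil_of_length_eq_zero (Nat.le_zero.mp h)
    subst hl
    simp [PySem.Chars.splitOn.go, pvSplitSp, pvAttach]
  | succ fuel ih =>
    cases l with
    | nil => simp [PySem.Chars.splitOn.go, pvSplitSp, pvAttach]
    | cons c rest =>
      rw [PySem.Chars.splitOn.go]
      by_cases hc : c = ' '
      · subst hc
        have hp : List.isPrefixOf [' '] (' ' :: rest) = true := by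
          simp [List.isPrefixOf]
        rw [hp, if_pos rfl]
        have hdrop : List.drop ([' '] : List Char).length (' ' :: rest) = rest := rfl
        rw [hdrop, ih rest [] (cur.reverse :: acc) (by simpa using h)]
        simp only [pvSplitSp, List.reverse_cons, List.append_assoc,
          List.cons_append, List.nil_append]
        congr 1
        cases hs : pvSplitSp rest with
        | nil => exact absurd hs (pvSplitSp_ne_nil rest)
        | cons w ws => simp [pvAttach]
      · have hp : List.isPrefixOf [' '] (c :: rest) = false := by
          simp [List.isPrefixOf]
          exact fun hh => hc hh.symm
        rw [hp, if_neg (by simp)]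
        rw [ih rest (c :: cur) acc (by simpa using Nat.le_of_succ_le_succ (by simpa using h))]
        simp [pvSplitSp, hc, pvAttach_attach]

theorem pvSplitOn_eq (l : List Char) :
    PySem.Chars.splitOn l [' '] = pvSplitSp l := by
  rw [PySem.Chars.splitOn, pvGo_eq (l.length + 1) l [] [] (by omega)]
  simp [pvAttach_nil (pvSplitSp_ne_nil l)]

theorem pvFold_eq_all (sc : List Char) (w : List Char) (b : Bool) :
    w.foldl (fun g c => if !(PySem.Chars.isIn [c] sc) then false else g) b
      = (b && w.all (fun c => PySem.Chars.isIn [c] sc)) := by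
  induction w generalizing b with
  | nil => simp
  | cons c rest ih =>
    simp only [List.foldl, List.all_cons]
    rw [ih]
    cases PySem.Chars.isIn [c] sc <;> cases b <;> simp

theorem pvMain (sc : List Char) (l cur : List Char) :
    StrSpnGoA (pvAttach cur (pvSplitSp l)) sc
      = StrSpnGoB l sc cur.length (cur.all (fun c => PySem.Chars.isIn [c] sc)) := by
  induction l generalizing cur with
  | nil =>
    simp only [pvSplitSp, pvAttach, List.append_nil, StrSpnGoA, StrSpnGoB]
    rw [pvFold_eq_all]
    simp [PySem.Chars.len_eq]
  | cons c rest ih =>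
    by_cases hc : c = ' '
    · subst hc
      have hne := pvSplitSp_ne_nil rest
      have h0 : StrSpnGoA (pvSplitSp rest) sc = StrSpnGoB rest sc 0 true := by
        have h1 := ih ([] : List Char)
        rw [pvAttach_nil hne] at h1
        simpa using h1
      have hs : pvSplitSp (' ' :: rest) = [] :: pvSplitSp rest := by simp [pvSplitSp]
      rw [hs]
      simp only [pvAttach, List.append_nil, StrSpnGoA, StrSpnGoB]
      rw [pvFold_eq_all, h0]
      split_ifs with hv <;> simp_all [PySem.Chars.len_eq]
    · simp only [pvSplitSp, hc, if_false, pvAttach_attach]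
      rw [ih (cur ++ [c])]
      simp [StrSpnGoB, hc]

theorem StrSpn_eq_alt (ms sc : String) : StrSpn ms sc = StrSpn_alt ms sc := by
  unfold StrSpn StrSpn_alt
  rw [pvSplitOn_eq]
  have := pvMain sc.toList ms.toList []
  rw [pvAttach_nil (pvSplitSp_ne_nil ms.toList)] at this
  simpa using this

-- ===== VERDICT (by name: the statement is the Claim_ definition above) =====
theorem StrSpn_spec : Claim_equal_StrSpn := by
  intro ms sc _
  unfold Spec_StrSpn
  exact StrSpn_eq_alt ms sc
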